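-- pv_equiv track=rewrite | github.com/abfhdays/vlr-newsletter | app/scraper.py | _is_date_heading
-- ===== SOURCE A (Python) =====
-- def _is_date_heading(txt: str) -> bool:
--         """Heading like 'AUGUST 20' or the special 'TODAY' / 'YESTERDAY' tokens."""
--         MONTHS = (
--         "JANUARY","FEBRUARY","MARCH","APRIL","MAY","JUNE",
--         "JULY","AUGUST","SEPTEMBER","OCTOBER","NOVEMBER","DECEMBER"
--     )
--         if not txt:
--             return False
--         t = txt.strip().upper()
--         if t in ("TODAY", "YESTERDAY"):
--             return True
--         return any(t.startswith(m + " ") for m in MONTHS)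
-- ===== SOURCE B (Python) =====
-- def _is_date_heading(txt: str) -> bool:
--     """Heading like 'AUGUST 20' or the special 'TODAY' / 'YESTERDAY' tokens."""
--     months = ("JANUARY FEBRUARY MARCH APRIL MAY JUNE "
--               "JULY AUGUST SEPTEMBER OCTOBER NOVEMBER DECEMBER").split()
--     t = txt.strip().upper() if txt else ''
--     if t == "TODAY" or t == "YESTERDAY":
--         return True
--     # Single left-to-right pass: keep the months still consistent with the
--     # characters read so far; at the first space, accept iff some surviving
--     # month ends exactly there.
--     cands = months
--     for i, c in enumerate(t):
--         if c == ' ':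
--             return any(len(m) == i for m in cands)
--         cands = [m for m in cands if i < len(m) and m[i] == c]
--         if not cands:
--             return False
--     return False
-- ===== Notes on version B (the rewrite author's own statement) =====
-- stated objective: alternative
-- what changed: B replaces A's twelve independent startswith scans with one incremental left-to-right pass over the text that maintains a shrinking set of candidate months consistent with the characters read so far, deciding at the first space (and exiting early when no candidate survives).
import Mathlib
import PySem

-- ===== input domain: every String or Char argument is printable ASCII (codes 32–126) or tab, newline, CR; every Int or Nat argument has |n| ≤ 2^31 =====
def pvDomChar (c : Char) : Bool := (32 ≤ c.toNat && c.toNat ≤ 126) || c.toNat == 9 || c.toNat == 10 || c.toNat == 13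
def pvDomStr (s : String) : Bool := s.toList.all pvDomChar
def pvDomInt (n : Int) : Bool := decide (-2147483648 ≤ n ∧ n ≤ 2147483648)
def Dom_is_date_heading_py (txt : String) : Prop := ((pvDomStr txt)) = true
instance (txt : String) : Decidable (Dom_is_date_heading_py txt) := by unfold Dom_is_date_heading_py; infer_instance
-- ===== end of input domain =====

-- B replaces A's twelve startswith scans with one incremental pass over the text that narrows a candidate-month list (alternative algorithm, same cost class).

-- ===== PORT A =====
def pvMonths : List String :=
  ["JANUARY","FEBRUARY","MARCH","APRIL","MAY","JUNE",
   "JULY","AUGUST","SEPTEMBER","OCTOBER","NOVEMBER","DECEMBER"]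

def is_date_heading_py (txt : String) : Bool :=
  if txt == "" then false
  else
    let t := PySem.Str.upper (PySem.Str.strip txt)
    if t == "TODAY" || t == "YESTERDAY" then true
    else pvMonths.any (fun m => PySem.Str.startswith t (m ++ " "))

-- ===== PORT B =====
-- the 'for i, c in enumerate(t)' loop of Source B: index i, surviving candidates
def pvScan : List Char → Nat → List String → Bool
  | [], _, _ => false
  | c :: rs, i, cands =>
    if c == ' ' then cands.any (fun m => m.toList.length == i)
    else
      let cands' := cands.filter (fun m => decide (i < m.toList.length) && (m.toList[i]? == some c))
      if cands'.isEmpty then false else pvScan rs (i + 1) cands'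

def pvMonthsB : List String :=
  PySem.Str.split₀ "JANUARY FEBRUARY MARCH APRIL MAY JUNE JULY AUGUST SEPTEMBER OCTOBER NOVEMBER DECEMBER"

def is_date_heading_py_alt (txt : String) : Bool :=
  let t := if txt == "" then "" else PySem.Str.upper (PySem.Str.strip txt)
  if t == "TODAY" || t == "YESTERDAY" then true
  else pvScan t.toList 0 pvMonthsB

-- ===== PRECONDITION & SPEC =====
def Spec_is_date_heading_py (txt : String) (out : Bool) : Prop := out = is_date_heading_py_alt txt
instance (txt : String) (out : Bool) : Decidable (Spec_is_date_heading_py txt out) := by unfold Spec_is_date_heading_py; infer_instance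

-- ===== CLAIM (what is proved, stated in full; the proofs are below) =====
def Claim_equal_is_date_heading_py : Prop := ∀ (txt : String), Dom_is_date_heading_py txt → Spec_is_date_heading_py txt (is_date_heading_py txt)

-- ===== LEMMAS AND PROOFS =====

-- one step of the scan: consuming a non-space character c
theorem pv_step (m : List Char) (i : Nat) (c : Char) (rs : List Char)
    (hi : i ≤ m.length) (hc : c ≠ ' ') :
    (m.drop i ++ [' '] <+: c :: rs) ↔
      (i < m.length ∧ m[i]? = some c ∧ m.drop (i + 1) ++ [' '] <+: rs) := by
  cases hdrop : m.drop i with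
  | nil =>
    have hlen : m.length ≤ i := List.drop_eq_nil_iff.1 hdrop
    rw [List.nil_append]
    constructor
    · intro hp
      exact absurd ((List.cons_prefix_cons.1 hp).1).symm hc
    · intro hp
      exact absurd hp.1 (by omega)
  | cons h tl =>
    have hlt : i < m.length := by
      by_contra hno
      have hnil : List.drop i m = [] := List.drop_eq_nil_iff.2 (by omega)
      rw [hnil] at hdrop
      simp at hdrop
    have hget : m[i]? = some h := by
      have h0 : (List.drop i m)[0]? = m[i + 0]? := List.getElem?_drop
      rw [hdrop] at h0
      simpa using h0.symm
    have htl : tl = List.drop (i + 1) m := by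
      have h1 : (List.drop i m).tail = List.drop (i + 1) m := List.tail_drop
      rw [hdrop] at h1
      simpa using h1
    rw [htl, List.cons_append, List.cons_prefix_cons]
    constructor
    · rintro ⟨he, hp⟩
      subst he
      exact ⟨hlt, hget, hp⟩
    · rintro ⟨-, hget', hp⟩
      rw [hget] at hget'
      exact ⟨Option.some_inj.mp hget', hp⟩

-- loop invariant: the scan accepts iff some surviving candidate, continued by a space, is a prefix of the rest
theorem pvScan_iff (rest : List Char) : ∀ (i : Nat) (cands : List String),
    (∀ m ∈ cands, i ≤ m.toList.length) →
    (∀ m ∈ cands, ' ' ∉ m.toList) →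
    (pvScan rest i cands = true ↔ ∃ m ∈ cands, m.toList.drop i ++ [' '] <+: rest) := by
  induction rest with
  | nil =>
    intro i cands _ _
    simp [pvScan]
  | cons c rs ih =>
    intro i cands hlen hsp
    by_cases hc : c = ' '
    · subst hc
      simp only [pvScan, beq_self_eq_true, if_pos]
      rw [List.any_eq_true]
      constructor
      · rintro ⟨m, hm, he⟩
        have he' : m.toList.length = i := by simpa using he
        refine ⟨m, hm, ?_⟩
        rw [List.drop_eq_nil_iff.2 (by omega)]
        exact ⟨rs, rfl⟩
      · rintro ⟨m, hm, hpre⟩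
        cases hdrop : m.toList.drop i with
        | nil =>
          have : m.toList.length ≤ i := List.drop_eq_nil_iff.1 hdrop
          have : m.toList.length = i := le_antisymm this (hlen m hm)
          exact ⟨m, hm, by simpa using this⟩
        | cons h tl =>
          rw [hdrop] at hpre
          have hh : h = ' ' := ((List.cons_prefix_cons).1 (by simpa using hpre)).1
          have : h ∈ m.toList := List.mem_of_mem_drop (by rw [hdrop]; exact List.mem_cons_self ..)
          rw [hh] at this
          exact absurd this (hsp m hm)
    · have hcb : (c == ' ') = false := by simpa using hc
      simp only [pvScan, hcb, if_neg, Bool.false_eq_true, not_false_eq_true]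
      set cands' := cands.filter (fun m => decide (i < m.toList.length) && (m.toList[i]? == some c)) with hcs
      have hmem : ∀ m, m ∈ cands' ↔ (m ∈ cands ∧ i < m.toList.length ∧ m.toList[i]? = some c) := by
        intro m
        rw [hcs, List.mem_filter]
        simp
      have hstep : (∃ m ∈ cands', m.toList.drop (i + 1) ++ [' '] <+: rs) ↔
          ∃ m ∈ cands, m.toList.drop i ++ [' '] <+: c :: rs := by
        constructor
        · rintro ⟨m, hm, hpre⟩
          obtain ⟨hm0, hlt, hget⟩ := (hmem m).1 hm
          exact ⟨m, hm0, (pv_step _ _ _ _ (by omega) hc).2 ⟨hlt, hget, hpre⟩⟩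
        · rintro ⟨m, hm, hpre⟩
          obtain ⟨hlt, hget, hpre'⟩ := (pv_step _ _ _ _ (hlen m hm) hc).1 hpre
          exact ⟨m, (hmem m).2 ⟨hm, hlt, hget⟩, hpre'⟩
      by_cases hemp : cands' = []
      · rw [if_pos (by simp [hemp])]
        rw [← hstep]
        simp [hemp]
      · rw [if_neg (by simp [hemp])]
        rw [ih (i + 1) cands'
          (fun m hm => by have := (hmem m).1 hm; omega)
          (fun m hm => hsp m ((hmem m).1 hm).1)]
        exact hstep

-- the months contain no space
theorem pv_months_no_space : ∀ m ∈ pvMonths, ' ' ∉ m.toList := by decide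

-- the last branch of A equals the last branch of B
theorem pv_branch_eq (t : String) :
    pvMonths.any (fun m => PySem.Str.startswith t (m ++ " ")) = pvScan t.toList 0 pvMonths := by
  rw [Bool.eq_iff_iff, List.any_eq_true,
    pvScan_iff t.toList 0 pvMonths (fun m _ => Nat.zero_le _) pv_months_no_space]
  apply exists_congr; intro m
  apply and_congr_right; intro _
  rw [PySem.Str.startswith_eq, PySem.Chars.startswith_iff]
  simp

-- Source B's split() of the month string yields exactly A's month list
theorem pv_months_eq : pvMonthsB = pvMonths := by decide

-- the whole else-branch of A equals that of B
theorem pv_body_eq (t : String) :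
    (if t == "TODAY" || t == "YESTERDAY" then true
     else pvMonths.any (fun m => PySem.Str.startswith t (m ++ " "))) =
    (if t == "TODAY" || t == "YESTERDAY" then true
     else pvScan t.toList 0 pvMonthsB) := by
  by_cases h : (t == "TODAY" || t == "YESTERDAY") = true
  · rw [if_pos h, if_pos h]
  · rw [if_neg h, if_neg h, pv_months_eq]
    exact pv_branch_eq t

-- ===== VERDICT (by name: the statement is the Claim_ definition above) =====
theorem is_date_heading_py_spec : Claim_equal_is_date_heading_py := by
  intro txt _
  show is_date_heading_py txt = is_date_heading_py_alt txt
  unfold is_date_heading_py is_date_heading_py_alt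
  by_cases h0 : (txt == "") = true
  · rw [if_pos h0, if_pos h0]
    decide
  · rw [if_neg h0, if_neg h0]
    exact pv_body_eq _
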